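-- pv_equiv track=rewrite | github.com/ColdCode0214/LeetCode_local | OA/Amazon OA/OA-03.py | oa1t3
-- ===== SOURCE A (Python) =====
-- def oa1t3(searchWord:str, resultWord:str) -> int:
--     ns, nr = len(searchWord), len(resultWord)
--     si, ri = 0, 0
--     while si < ns and ri < nr:
--         if searchWord[si] != resultWord[ri]:
--             si += 1
--         else:
--             si += 1
--             ri += 1
--     return nr-ri
-- ===== SOURCE B (Python) =====
-- def oa1t3(searchWord: str, resultWord: str) -> int:
--     # index: char -> sorted list of its positions in searchWord
--     positions = {}
--     i = 0
--     for c in searchWord: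
--         positions.setdefault(c, []).append(i)
--         i += 1
--     pos = 0
--     matched = 0
--     for ch in resultWord:
--         lst = positions.get(ch, [])
--         # binary search: first entry >= pos
--         lo, hi = 0, len(lst)
--         while lo < hi:
--             mid = (lo + hi) // 2
--             if lst[mid] < pos:
--                 lo = mid + 1
--             else:
--                 hi = mid
--         if lo == len(lst):
--             break
--         pos = lst[lo] + 1
--         matched += 1
--     return len(resultWord) - matched
-- ===== Notes on version B (the rewrite author's own statement) =====
-- stated objective: alternative
-- what changed: B precomputes a per-character index of positions in searchWord once and then, for each character of resultWord, binary-searches that character's position list for the first occurrence at or after the current position, instead of A's two-pointer linear walk over both strings.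
import Mathlib
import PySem

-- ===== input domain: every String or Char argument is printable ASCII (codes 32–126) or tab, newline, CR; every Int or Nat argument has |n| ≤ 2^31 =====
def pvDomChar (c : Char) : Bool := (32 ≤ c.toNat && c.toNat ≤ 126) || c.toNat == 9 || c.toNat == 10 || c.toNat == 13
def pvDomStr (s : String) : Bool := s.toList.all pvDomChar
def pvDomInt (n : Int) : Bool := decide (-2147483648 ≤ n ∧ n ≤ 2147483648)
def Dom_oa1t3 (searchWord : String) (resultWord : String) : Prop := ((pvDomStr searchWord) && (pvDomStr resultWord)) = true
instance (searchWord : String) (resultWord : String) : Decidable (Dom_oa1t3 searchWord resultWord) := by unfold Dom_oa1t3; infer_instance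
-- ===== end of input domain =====

-- B precomputes a per-character position index of searchWord and binary-searches it per resultWord
-- character, instead of A's two-pointer linear walk; alternative algorithm, similar cost.


-- ===== PORT A =====
-- A's while-loop: si walks searchWord, ri walks resultWord; structural recursion on both
-- lists carries the same state (the unconsumed suffixes), returning ri (= count matched).
def oa1t3Go : List Char → List Char → Nat
  | [], _ => 0
  | _, [] => 0
  | c :: s, d :: r => if c ≠ d then oa1t3Go s (d :: r) else 1 + oa1t3Go s r

def oa1t3 (searchWord : String) (resultWord : String) : Int :=
  (resultWord.toList.length : Int) - (oa1t3Go searchWord.toList resultWord.toList : Int)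

-- ===== PORT B =====
-- the first for-loop of Source B: positions.setdefault(c, []).append(i), i += 1
def oa1t3BuildIdx : List Char → Nat → PySem.Dict Char (List Nat) → PySem.Dict Char (List Nat)
  | [], _, d => d
  | c :: cs, i, d => oa1t3BuildIdx cs (i + 1) (d.insert c (d.getD c [] ++ [i]))

-- the inner while-loop of Source B (binary search); lst[mid] ported as getD (mid < hi ≤ len(lst), in range)
def oa1t3Bsearch (lst : List Nat) (pos : Nat) (lo hi : Nat) : Nat :=
  if lo < hi then
    let mid := (lo + hi) / 2
    if lst.getD mid 0 < pos then oa1t3Bsearch lst pos (mid + 1) hi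
    else oa1t3Bsearch lst pos lo mid
  else lo
termination_by hi - lo
decreasing_by all_goals omega

-- the for-loop over resultWord carrying (pos, matched); returns matched
def oa1t3AltGo (d : PySem.Dict Char (List Nat)) : List Char → Nat → Nat
  | [], _ => 0
  | ch :: rs, pos =>
    let lst := d.getD ch []
    let lo := oa1t3Bsearch lst pos 0 lst.length
    if lo = lst.length then 0
    else 1 + oa1t3AltGo d rs (lst.getD lo 0 + 1)

def oa1t3_alt (searchWord : String) (resultWord : String) : Int :=
  (resultWord.toList.length : Int) -
    (oa1t3AltGo (oa1t3BuildIdx searchWord.toList 0 PySem.Dict.empty) resultWord.toList 0 : Int)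

-- ===== PRECONDITION & SPEC =====
def Spec_oa1t3 (searchWord : String) (resultWord : String) (out : Int) : Prop := out = oa1t3_alt searchWord resultWord
instance (searchWord : String) (resultWord : String) (out : Int) : Decidable (Spec_oa1t3 searchWord resultWord out) := by unfold Spec_oa1t3; infer_instance

-- ===== CLAIM (what is proved, stated in full; the proofs are below) =====
def Claim_equal_oa1t3 : Prop := ∀ (searchWord : String) (resultWord : String), Dom_oa1t3 searchWord resultWord → Spec_oa1t3 searchWord resultWord (oa1t3 searchWord resultWord)

-- ===== LEMMAS AND PROOFS =====

-- spec of the index: the positions of ch in t, indices starting at b (increasing)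
def pvOccs : List Char → Nat → Char → List Nat
  | [], _, _ => []
  | c :: cs, b, ch => if c == ch then b :: pvOccs cs (b + 1) ch else pvOccs cs (b + 1) ch

-- linear spec of "first position of ch at index ≥ pos", counting from base b
def pvFirstOcc : List Char → Char → Nat → Nat → Option Nat
  | [], _, _, _ => none
  | c :: cs, ch, i, pos => if pos ≤ i ∧ c == ch then some i else pvFirstOcc cs ch (i + 1) pos

-- A-side linear find (first match of ch in t, counter starting at i)
def oa1t3FindAux : List Char → Char → Nat → Option Nat
  | [], _, _ => none
  | c :: cs, ch, i => if c == ch then some i else oa1t3FindAux cs ch (i + 1)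

theorem oa1t3BuildIdx_getD (t : List Char) (b : Nat) (d : PySem.Dict Char (List Nat)) (ch : Char) :
    (oa1t3BuildIdx t b d).getD ch [] = d.getD ch [] ++ pvOccs t b ch := by
  induction t generalizing b d with
  | nil => simp [oa1t3BuildIdx, pvOccs]
  | cons c cs ih =>
    simp only [oa1t3BuildIdx, pvOccs]
    rw [ih, PySem.Dict.getD_insert]
    by_cases h : ch = c
    · subst h
      simp
    · have hb : ¬ (c == ch) = true := by simp [Ne.symm h]
      simp [h, hb]

theorem pvOccs_lb (t : List Char) (b : Nat) (ch : Char) : ∀ x ∈ pvOccs t b ch, b ≤ x := by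
  induction t generalizing b with
  | nil => simp [pvOccs]
  | cons c cs ih =>
    intro x hx
    simp only [pvOccs] at hx
    split at hx
    · rcases List.mem_cons.mp hx with h | h
      · omega
      · have := ih (b + 1) x h; omega
    · have := ih (b + 1) x hx; omega

theorem pvOccs_pairwise (t : List Char) (b : Nat) (ch : Char) :
    (pvOccs t b ch).Pairwise (· < ·) := by
  induction t generalizing b with
  | nil => simp [pvOccs]
  | cons c cs ih =>
    simp only [pvOccs]
    split
    · exact List.Pairwise.cons (fun x hx => by have := pvOccs_lb cs (b + 1) ch x hx; omega) (ih (b + 1))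
    · exact ih (b + 1)

-- binary search: invariant proof via the function's own induction principle
theorem oa1t3Bsearch_correct (lst : List Nat) (pos : Nat)
    (hmono : ∀ i j, i < j → j < lst.length → lst.getD i 0 < lst.getD j 0) :
    ∀ lo hi, lo ≤ hi → hi ≤ lst.length →
      (∀ k, k < lo → lst.getD k 0 < pos) →
      (hi < lst.length → pos ≤ lst.getD hi 0) →
      oa1t3Bsearch lst pos lo hi ≤ lst.length ∧
      (∀ k, k < oa1t3Bsearch lst pos lo hi → lst.getD k 0 < pos) ∧
      (oa1t3Bsearch lst pos lo hi < lst.length → pos ≤ lst.getD (oa1t3Bsearch lst pos lo hi) 0) := by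
  intro lo hi
  induction lo, hi using oa1t3Bsearch.induct lst pos with
  | case1 lo hi hlt mid hmid ih =>
    intro hlohi hhilen hbelow habove
    rw [oa1t3Bsearch, if_pos hlt]
    rw [if_pos (show lst.getD ((lo + hi) / 2) 0 < pos from hmid)]
    exact ih (by omega) (by omega)
      (fun k hk => by
        by_cases hkm : k = mid
        · subst hkm; exact hmid
        · calc lst.getD k 0 < lst.getD mid 0 := hmono k mid (by omega) (by omega)
            _ < pos := hmid)
      habove
  | case2 lo hi hlt mid hmid ih =>
    intro hlohi hhilen hbelow habove
    rw [oa1t3Bsearch, if_pos hlt]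
    rw [if_neg (show ¬ lst.getD ((lo + hi) / 2) 0 < pos from hmid)]
    exact ih (by omega) (by omega) hbelow (fun _ => by omega)
  | case3 lo hi hge =>
    intro hlohi hhilen hbelow habove
    rw [oa1t3Bsearch, if_neg hge]
    refine ⟨by omega, hbelow, fun h => ?_⟩
    have heq : lo = hi := by omega
    exact heq ▸ habove (heq ▸ h)

-- the index r characterises find? (first element ≥ pos)
theorem find?_of_bounds (lst : List Nat) (pos : Nat) : ∀ r, r ≤ lst.length →
    (∀ k, k < r → lst.getD k 0 < pos) → (r < lst.length → pos ≤ lst.getD r 0) →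
    lst.find? (fun x => decide (pos ≤ x)) = lst[r]? := by
  induction lst with
  | nil =>
    intro r hr _ _
    simp at hr
    simp [hr]
  | cons x xs ih =>
    intro r hr hbelow habove
    cases r with
    | zero =>
      have hx : pos ≤ x := by simpa using habove (by simp)
      rw [List.find?_cons_of_pos (by simpa using hx)]
      simp
    | succ r' =>
      have hx : x < pos := by simpa using hbelow 0 (by omega)
      rw [List.find?_cons_of_neg (by simp; omega)]
      rw [List.getElem?_cons_succ]
      exact ih r' (by simpa using hr)
        (fun k hk => by simpa using hbelow (k + 1) (by omega))
        (fun h => by simpa using habove (by simpa using h))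

-- find? over the occurrence list = linear firstOcc
theorem find?_pvOccs (t : List Char) (ch : Char) (b pos : Nat) :
    (pvOccs t b ch).find? (fun x => decide (pos ≤ x)) = pvFirstOcc t ch b pos := by
  induction t generalizing b with
  | nil => simp [pvOccs, pvFirstOcc]
  | cons c cs ih =>
    simp only [pvOccs, pvFirstOcc]
    by_cases hc : (c == ch) = true
    · rw [if_pos hc]
      by_cases hp : pos ≤ b
      · rw [List.find?_cons_of_pos (by simpa using hp), if_pos ⟨hp, hc⟩]
      · rw [List.find?_cons_of_neg (by simpa using hp),
          if_neg (fun h => hp h.1)]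
        exact ih (b + 1)
    · rw [if_neg hc, if_neg (fun h => hc h.2)]
      exact ih (b + 1)

-- once the base has reached pos, firstOcc is plain find
theorem pvFirstOcc_ge (t : List Char) (ch : Char) (b pos : Nat) (h : pos ≤ b) :
    pvFirstOcc t ch b pos = oa1t3FindAux t ch b := by
  induction t generalizing b with
  | nil => simp [pvFirstOcc, oa1t3FindAux]
  | cons c cs ih =>
    simp only [pvFirstOcc, oa1t3FindAux]
    by_cases hc : (c == ch) = true
    · simp [hc, h]
    · simp only [hc, Bool.false_eq_true, and_false, if_neg, not_false_eq_true]
      exact ih (b + 1) (by omega)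

-- below pos, firstOcc skips: it is find on the dropped suffix
theorem pvFirstOcc_drop (t : List Char) (ch : Char) : ∀ b pos, b ≤ pos →
    pvFirstOcc t ch b pos = oa1t3FindAux (t.drop (pos - b)) ch pos := by
  induction t with
  | nil => intro b pos _; simp [pvFirstOcc, oa1t3FindAux]
  | cons c cs ih =>
    intro b pos hble
    by_cases hb : b = pos
    · subst hb
      simp only [Nat.sub_self, List.drop_zero]
      exact pvFirstOcc_ge (c :: cs) ch b b le_rfl
    · have hblt : b < pos := by omega
      have : ¬ (pos ≤ b ∧ (c == ch) = true) := fun ⟨h, _⟩ => by omega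
      simp only [pvFirstOcc, if_neg this]
      rw [ih (b + 1) pos (by omega)]
      have : (c :: cs).drop (pos - b) = cs.drop (pos - (b + 1)) := by
        have h1 : pos - b = (pos - (b + 1)) + 1 := by omega
        rw [h1]; rfl
      rw [this]

-- the offset parameter of findAux is a pure shift
theorem oa1t3FindAux_shift (t : List Char) (ch : Char) (k : Nat) :
    oa1t3FindAux t ch k = (oa1t3FindAux t ch 0).map (· + k) := by
  induction t generalizing k with
  | nil => simp [oa1t3FindAux]
  | cons c cs ih =>
    by_cases h : c == ch
    · simp [oa1t3FindAux, h]
    · simp only [oa1t3FindAux, h, Bool.false_eq_true, if_neg, not_false_eq_true]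
      rw [ih (k + 1), ih 1]
      cases oa1t3FindAux cs ch 0
      · simp
      · simp; omega

-- A's skipping of mismatches computes exactly "find first occurrence, then recurse on the rest"
theorem oa1t3Go_find (s : List Char) (d : Char) (rs : List Char) :
    oa1t3Go s (d :: rs) =
      match oa1t3FindAux s d 0 with
      | none => 0
      | some j => 1 + oa1t3Go (s.drop (j + 1)) rs := by
  induction s with
  | nil => simp [oa1t3Go, oa1t3FindAux]
  | cons c cs ih =>
    by_cases h : c == d
    · have : c = d := by simpa using h
      simp [oa1t3Go, oa1t3FindAux, this]
    · have hne : c ≠ d := by simpa using h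
      simp only [oa1t3Go, oa1t3FindAux, h, Bool.false_eq_true, if_false, if_pos hne]
      rw [ih, oa1t3FindAux_shift cs d 1]
      cases oa1t3FindAux cs d 0 <;> simp

-- B's one step (index lookup + binary search) computes findAux on the dropped suffix
theorem oa1t3_step (s : List Char) (ch : Char) (pos : Nat) :
    (let lst := (oa1t3BuildIdx s 0 PySem.Dict.empty).getD ch []
     let lo := oa1t3Bsearch lst pos 0 lst.length
     if lo = lst.length then (none : Option Nat) else some (lst.getD lo 0)) =
    oa1t3FindAux (s.drop pos) ch pos := by
  have hlst : (oa1t3BuildIdx s 0 PySem.Dict.empty).getD ch [] = pvOccs s 0 ch := by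
    rw [oa1t3BuildIdx_getD]
    simp [PySem.Dict.getD_empty]
  simp only [hlst]
  have hpw := pvOccs_pairwise s 0 ch
  set lst := pvOccs s 0 ch with hdef
  have hmono : ∀ i j, i < j → j < lst.length → lst.getD i 0 < lst.getD j 0 := by
    intro i j hij hj
    have hi : i < lst.length := by omega
    have := (List.pairwise_iff_getElem.mp hpw) i j hi hj hij
    rwa [List.getD_eq_getElem lst 0 hi, List.getD_eq_getElem lst 0 hj]
  obtain ⟨hrle, hbelow, habove⟩ :=
    oa1t3Bsearch_correct lst pos hmono 0 lst.length (by omega) le_rfl (by omega) (by omega)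
  set r := oa1t3Bsearch lst pos 0 lst.length with hr
  have hfind := find?_of_bounds lst pos r hrle hbelow habove
  rw [find?_pvOccs s ch 0 pos, pvFirstOcc_drop s ch 0 pos (by omega)] at hfind
  simp only [Nat.sub_zero] at hfind
  rw [hfind]
  by_cases h : r = lst.length
  · simp [h]
  · have hrlt : r < lst.length := by omega
    simp [h, List.getElem?_eq_getElem hrlt]

-- main invariant: B at position pos equals A run on the suffix searchWord[pos:]
theorem oa1t3AltGo_eq (s r : List Char) : ∀ pos : Nat,
    oa1t3AltGo (oa1t3BuildIdx s 0 PySem.Dict.empty) r pos = oa1t3Go (s.drop pos) r := by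
  induction r with
  | nil => intro pos; cases s.drop pos <;> simp [oa1t3AltGo, oa1t3Go]
  | cons ch rs ih =>
    intro pos
    rw [oa1t3Go_find (s.drop pos) ch rs]
    have hstep := oa1t3_step s ch pos
    simp only at hstep
    rw [oa1t3FindAux_shift (s.drop pos) ch pos] at hstep
    simp only [oa1t3AltGo]
    cases hf : oa1t3FindAux (s.drop pos) ch 0 with
    | none =>
      rw [hf] at hstep
      simp only [Option.map_none] at hstep
      rw [if_pos (by by_contra h; simp [h] at hstep)]
    | some j =>
      rw [hf] at hstep
      simp only [Option.map_some] at hstep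
      set lst := (oa1t3BuildIdx s 0 PySem.Dict.empty).getD ch []
      set lo := oa1t3Bsearch lst pos 0 lst.length
      have hlo : lo ≠ lst.length ∧ lst.getD lo 0 = j + pos := by
        by_cases h : lo = lst.length
        · simp [h] at hstep
        · simp [h] at hstep; exact ⟨h, hstep⟩
      rw [if_neg hlo.1, hlo.2, ih (j + pos + 1)]
      simp only [List.drop_drop]
      have : j + pos + 1 = pos + (j + 1) := by omega
      rw [this]

-- ===== VERDICT (by name: the statement is the Claim_ definition above) =====
theorem oa1t3_spec : Claim_equal_oa1t3 := by
  intro s r _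
  unfold Spec_oa1t3 oa1t3 oa1t3_alt
  rw [oa1t3AltGo_eq s.toList r.toList 0, List.drop_zero]
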